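-- pv_equiv track=rewrite | github.com/jgehrcke/jpsnips-nv | mnnvl-atack/dashboard.py | compact_node_names
-- ===== SOURCE A (Python) =====
-- def shorten_node(name):
--     """Default shortening: gb-nvl-156-compute15 -> compute15."""
--     parts = name.split("-")
--     return parts[-1] if len(parts) > 1 else name
--
-- def compact_node_names(names):
--     """Strip the longest common prefix from a set of node names, returning
--     a dict {original: shortened}. E.g. for gb-nvl-156-compute13,
--     gb-nvl-156-compute14, gb-nvl-156-compute15 → {'...13': '13', ...}.
--     Falls back to shorten_node() if only one name."""
--     name_list = sorted(set(names))
--     if len(name_list) <= 1: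
--         return {n: shorten_node(n) for n in names}
--
--     # Find longest common prefix.
--     prefix = name_list[0]
--     for n in name_list[1:]:
--         while not n.startswith(prefix):
--             prefix = prefix[:-1]
--             if not prefix:
--                 break
--
--     # Strip prefix, but keep at least 2 characters.
--     max_strip = max(0, min(len(n) for n in name_list) - 2)
--     strip_len = min(len(prefix), max_strip)
--
--     result = {}
--     for n in names:
--         short = n[strip_len:]
--         if not short:
--             short = n
--         result[n] = short
--     return result
-- ===== SOURCE B (Python) =====
-- def shorten_node(name):
--     parts = name.split("-")
--     return parts[-1] if len(parts) > 1 else name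
--
-- def compact_node_names(names):
--     name_list = sorted(set(names))
--     if len(name_list) <= 1:
--         return {n: shorten_node(n) for n in names}
--
--     # LCP of the whole sorted list = LCP of its two endpoints.
--     first, last = name_list[0], name_list[-1]
--     i = 0
--     while i < len(first) and i < len(last) and first[i] == last[i]:
--         i += 1
--
--     max_strip = max(0, min(len(n) for n in name_list) - 2)
--     strip_len = min(i, max_strip)
--     return {n: (n[strip_len:] or n) for n in names}
-- ===== Notes on version B (the rewrite author's own statement) =====
-- stated objective: simpler
-- what changed: A shrinks a candidate prefix character-by-character against every sorted name (a nested while loop); B computes the longest common prefix as the common-prefix length of only the two endpoints of the sorted list and returns a dict comprehension, dropping the nested loop.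
import Mathlib
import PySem

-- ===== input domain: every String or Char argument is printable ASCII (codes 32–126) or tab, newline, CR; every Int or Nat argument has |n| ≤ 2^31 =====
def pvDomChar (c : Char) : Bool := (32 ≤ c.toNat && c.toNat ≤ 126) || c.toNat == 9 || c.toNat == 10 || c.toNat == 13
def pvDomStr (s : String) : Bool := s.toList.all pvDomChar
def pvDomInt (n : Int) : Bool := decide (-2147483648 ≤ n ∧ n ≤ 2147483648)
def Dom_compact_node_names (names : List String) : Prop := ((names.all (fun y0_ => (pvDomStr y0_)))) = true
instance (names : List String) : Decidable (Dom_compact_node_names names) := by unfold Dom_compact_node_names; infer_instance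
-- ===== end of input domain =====

-- B replaces A's nested prefix-shrinking loop over all sorted names by the common-prefix
-- length of the two endpoints of the sorted list (objective: simpler).

-- ===== PORT A =====

-- parts[-1] ported with pyGet?; split? is some because the separator "-" is nonempty
def shorten_node (name : String) : String :=
  match PySem.Str.split? name "-" with
  | some parts => if 1 < parts.length then (PySem.List.pyGet? parts (-1)).getD name else name
  | none => name

-- the inner `while not n.startswith(prefix): prefix = prefix[:-1]; if not prefix: break`;
-- the prefix is handled as its character list (PySem.Chars are the string definitions)
def pvShrink (n : List Char) (p : List Char) : List Char :=
  if PySem.Chars.startswith n p then p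
  else
    let p' := PySem.List.slice p none (some (-1))
    if hp : p' = [] then p' else pvShrink n p'
termination_by p.length
decreasing_by
  rcases p with _ | ⟨c, q⟩
  · exact absurd rfl hp
  · simp [PySem.List.slice, List.length_take]

def compact_node_names (names : List String) : List (String × String) :=
  let name_list := PySem.List.sorted (PySem.Set.ofList names) (fun x => x) false
  if name_list.length ≤ 1 then
    names.foldl (fun d n => PySem.Dict.insert d n (shorten_node n)) PySem.Dict.empty |>.items
  else
    -- name_list[0] (nonempty here, so headI is exact)
    let pfx := (PySem.List.slice name_list (some 1) none).foldl
                 (fun p n => pvShrink n.toList p) name_list.headI.toList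
    let max_strip : Int :=
      max 0 (((PySem.List.min? (name_list.map (fun n => (n.toList.length : Int)))
                (fun x => x)).getD 0) - 2)
    let strip_len : Int := min (pfx.length : Int) max_strip
    names.foldl (fun d n =>
      let short := PySem.Str.slice n (some strip_len) none
      let short := if short = "" then n else short
      PySem.Dict.insert d n short) PySem.Dict.empty |>.items

-- ===== PORT B =====

-- `i = 0; while i < len(first) and i < len(last) and first[i] == last[i]: i += 1`
def pvLcpLen : List Char → List Char → Nat
  | x :: a, y :: b => if x = y then pvLcpLen a b + 1 else 0
  | _, _ => 0

def compact_node_names_alt (names : List String) : List (String × String) :=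
  let name_list := PySem.List.sorted (PySem.Set.ofList names) (fun x => x) false
  if name_list.length ≤ 1 then
    names.foldl (fun d n => PySem.Dict.insert d n (shorten_node n)) PySem.Dict.empty |>.items
  else
    -- name_list[0] and name_list[-1] (nonempty here, so headI/getLastD are exact)
    let first := name_list.headI
    let last := name_list.getLastD ""
    let i := pvLcpLen first.toList last.toList
    let max_strip : Int :=
      max 0 (((PySem.List.min? (name_list.map (fun n => (n.toList.length : Int)))
                (fun x => x)).getD 0) - 2)
    let strip_len : Int := min (i : Int) max_strip
    names.foldl (fun d n =>
      let s := PySem.Str.slice n (some strip_len) none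
      PySem.Dict.insert d n (if s = "" then n else s)) PySem.Dict.empty |>.items

-- ===== PRECONDITION & SPEC =====
def Spec_compact_node_names (names : List String) (out : List (String × String)) : Prop := out = compact_node_names_alt names
instance (names : List String) (out : List (String × String)) : Decidable (Spec_compact_node_names names out) := by unfold Spec_compact_node_names; infer_instance

-- ===== CLAIM (what is proved, stated in full; the proofs are below) =====
def Claim_equal_compact_node_names : Prop := ∀ (names : List String), Dom_compact_node_names names → Spec_compact_node_names names (compact_node_names names)

-- ===== LEMMAS AND PROOFS =====

-- the longest common prefix of two character lists
def pvCp : List Char → List Char → List Char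
  | x :: a, y :: b => if x = y then x :: pvCp a b else []
  | _, _ => []

theorem pvCp_nil_right (a : List Char) : pvCp a [] = [] := by
  cases a <;> simp [pvCp]

theorem pvCp_prefix_left : ∀ (a b : List Char), pvCp a b <+: a := by
  intro a
  induction a with
  | nil => intro b; simp [pvCp]
  | cons x a' ih =>
    intro b
    cases b with
    | nil => simp [pvCp]
    | cons y b' =>
      by_cases h : x = y
      · subst h; simpa [pvCp, List.cons_prefix_cons] using ih b'
      · simp [pvCp, h]

theorem pvCp_prefix_right : ∀ (a b : List Char), pvCp a b <+: b := by
  intro a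
  induction a with
  | nil => intro b; simp [pvCp]
  | cons x a' ih =>
    intro b
    cases b with
    | nil => simp [pvCp]
    | cons y b' =>
      by_cases h : x = y
      · subst h; simpa [pvCp, List.cons_prefix_cons] using ih b'
      · simp [pvCp, h]

theorem prefix_pvCp : ∀ (p a b : List Char), p <+: a → p <+: b → p <+: pvCp a b := by
  intro p
  induction p with
  | nil => intro a b _ _; exact List.nil_prefix
  | cons x p' ih =>
    intro a b ha hb
    cases a with
    | nil => simp at ha
    | cons xa a' =>
      cases b with
      | nil => simp at hb
      | cons xb b' =>
        rw [List.cons_prefix_cons] at ha hb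
        obtain ⟨rfl, ha'⟩ := ha
        obtain ⟨rfl, hb'⟩ := hb
        simpa [pvCp, List.cons_prefix_cons] using ih a' b' ha' hb'

theorem pvCp_of_prefix : ∀ (a b : List Char), a <+: b → pvCp a b = a := by
  intro a
  induction a with
  | nil => intro b _; simp [pvCp]
  | cons x a' ih =>
    intro b h
    cases b with
    | nil => simp at h
    | cons y b' =>
      rw [List.cons_prefix_cons] at h
      obtain ⟨rfl, h'⟩ := h
      simp [pvCp, ih b' h']

theorem pvCp_dropLast : ∀ (a b : List Char), ¬ a <+: b → pvCp a.dropLast b = pvCp a b := by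
  intro a
  induction a with
  | nil => intro b h; exact absurd List.nil_prefix h
  | cons x a' ih =>
    intro b h
    cases b with
    | nil => simp [pvCp_nil_right]
    | cons y b' =>
      by_cases hxy : x = y
      · subst hxy
        cases a' with
        | nil => exact absurd (by simp [List.cons_prefix_cons]) h
        | cons c a'' =>
          have h' : ¬ (c :: a'') <+: b' := fun hc => h (by simp [List.cons_prefix_cons, hc])
          rw [List.dropLast_cons₂]
          simp [pvCp, ih b' h']
      · cases a' with
        | nil => simp [pvCp, hxy]
        | cons c a'' => rw [List.dropLast_cons₂]; simp [pvCp, hxy]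

theorem pvShrink_eq (n p : List Char) : pvShrink n p = pvCp p n := by
  rw [pvShrink]
  by_cases h : PySem.Chars.startswith n p
  · simp [h, pvCp_of_prefix p n ((PySem.Chars.startswith_iff n p).mp h)]
  · have hnp : ¬ p <+: n := fun hp => h ((PySem.Chars.startswith_iff n p).mpr hp)
    have hne : p ≠ [] := by rintro rfl; exact hnp List.nil_prefix
    have hs : PySem.List.slice p none (some (-1)) = p.dropLast := by
      rcases p with _ | ⟨c, q⟩
      · rfl
      · simp [PySem.List.slice, List.dropLast_eq_take]
    rw [← pvCp_dropLast p n hnp]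
    by_cases he : PySem.List.slice p none (some (-1)) = []
    · have hd : p.dropLast = [] := hs ▸ he
      simp [h, he, hd, pvCp]
    · have hlt : p.dropLast.length < p.length := by
        have := List.length_pos_iff.mpr hne
        simp [List.length_dropLast]; omega
      simp only [Bool.not_eq_true] at h
      simp only [h, Bool.false_eq_true, if_false, he, dif_neg, not_false_iff]
      rw [hs]
      exact pvShrink_eq n p.dropLast
termination_by p.length
decreasing_by simpa [List.length_dropLast] using Nat.sub_lt (List.length_pos_iff.mpr hne) one_pos

theorem pvLcpLen_eq : ∀ (a b : List Char), pvLcpLen a b = (pvCp a b).length := by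
  intro a
  induction a with
  | nil => intro b; cases b <;> simp [pvLcpLen, pvCp]
  | cons x a' ih =>
    intro b
    cases b with
    | nil => simp [pvLcpLen, pvCp]
    | cons y b' =>
      by_cases hxy : x = y <;> simp [pvLcpLen, pvCp, hxy, ih]

theorem pv_cons_le_iff (x y : Char) (a b : List Char) :
    (x :: a) ≤ (y :: b) ↔ x < y ∨ (x = y ∧ a ≤ b) := by
  rw [le_iff_lt_or_eq, List.cons_lt_cons_iff]
  constructor
  · rintro ((h | ⟨rfl, hab⟩) | heq)
    · exact Or.inl h
    · exact Or.inr ⟨rfl, le_of_lt hab⟩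
    · cases heq; exact Or.inr ⟨rfl, le_refl _⟩
  · rintro (h | ⟨rfl, hab⟩)
    · exact Or.inl (Or.inl h)
    · rcases le_iff_lt_or_eq.mp hab with h' | rfl
      · exact Or.inl (Or.inr ⟨rfl, h'⟩)
      · exact Or.inr rfl

theorem pv_not_cons_le_nil (x : Char) (a : List Char) : ¬ ((x :: a) ≤ []) := by
  rw [le_iff_lt_or_eq]
  rintro (h | h)
  · exact List.not_lt_nil _ h
  · exact List.cons_ne_nil _ _ h

-- a ≤ b ≤ c in lexicographic order pinches b onto the common prefix of a and c
theorem pvCp_between : ∀ (a b c : List Char), a ≤ b → b ≤ c → pvCp a c <+: b := by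
  intro a
  induction a with
  | nil => intro b c _ _; simp [pvCp]
  | cons x a' ih =>
    intro b c hab hbc
    cases c with
    | nil => simp [pvCp_nil_right]
    | cons z c' =>
      by_cases hxz : x = z
      · subst hxz
        cases b with
        | nil => exact absurd hab (pv_not_cons_le_nil x a')
        | cons y b' =>
          rw [pv_cons_le_iff] at hab hbc
          rcases hab with hlt | ⟨rfl, hab'⟩
          · rcases hbc with hlt2 | ⟨rfl, _⟩
            · exact absurd (hlt.trans hlt2) (lt_irrefl _)
            · exact absurd hlt (lt_irrefl _)
          · rcases hbc with hlt2 | ⟨_, hbc'⟩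
            · exact absurd hlt2 (lt_irrefl _)
            · simpa [pvCp, List.cons_prefix_cons] using ih b' c' hab' hbc'
      · simp [pvCp, hxz]

theorem foldl_pvCp_prefix : ∀ (ls : List (List Char)) (q : List Char),
    ls.foldl pvCp q <+: q ∧ ∀ x ∈ ls, ls.foldl pvCp q <+: x := by
  intro ls
  induction ls with
  | nil => intro q; exact ⟨List.prefix_rfl, by simp⟩
  | cons u ls' ih =>
    intro q
    obtain ⟨h1, h2⟩ := ih (pvCp q u)
    simp only [List.foldl_cons]
    refine ⟨h1.trans (pvCp_prefix_left q u), ?_⟩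
    intro x hx
    rcases List.mem_cons.mp hx with rfl | hx'
    · exact h1.trans (pvCp_prefix_right q x)
    · exact h2 x hx'

theorem prefix_foldl_pvCp : ∀ (ls : List (List Char)) (q r : List Char),
    r <+: q → (∀ x ∈ ls, r <+: x) → r <+: ls.foldl pvCp q := by
  intro ls
  induction ls with
  | nil => intro q r hq _; exact hq
  | cons u ls' ih =>
    intro q r hq h
    simp only [List.foldl_cons]
    exact ih _ r (prefix_pvCp r q u hq (h u (List.mem_cons_self))) fun x hx => h x (List.mem_cons_of_mem _ hx)

theorem pairwise_le_getLastD : ∀ (l : List String), l.Pairwise (· ≤ ·) →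
    ∀ x ∈ l, x ≤ l.getLastD "" := by
  intro l
  induction l with
  | nil => simp
  | cons a t ih =>
    intro hp x hx
    rw [List.pairwise_cons] at hp
    cases t with
    | nil =>
      rcases List.mem_singleton.mp hx with rfl
      simp
    | cons b t' =>
      have hlast : (a :: b :: t').getLastD "" = (b :: t').getLastD "" := by
        simp
      rcases List.mem_cons.mp hx with rfl | hx'
      · rw [hlast]
        have hmem : (b :: t').getLastD "" ∈ b :: t' := by
          have : (b :: t').getLastD "" = t'.getLastD b := List.getLastD_cons
          rw [this]; exact List.getLastD_mem_cons
        exact hp.1 _ hmem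
      · rw [hlast]; exact ih hp.2 x hx'

theorem fold_eq_cp_last (h : String) (t : List String) (hp : (h :: t).Pairwise (· ≤ ·)) :
    t.foldl (fun p n => pvCp p n.toList) h.toList
      = pvCp h.toList (((h :: t).getLastD "").toList) := by
  have hfold : t.foldl (fun p n => pvCp p n.toList) h.toList
      = (t.map String.toList).foldl pvCp h.toList := by
    rw [List.foldl_map]
  have hLmem : (h :: t).getLastD "" ∈ h :: t := by
    have : (h :: t).getLastD "" = t.getLastD h := List.getLastD_cons
    rw [this]; exact List.getLastD_mem_cons
  rw [hfold]
  obtain ⟨h1a, h1b⟩ := foldl_pvCp_prefix (t.map String.toList) h.toList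
  have hdir1 : (t.map String.toList).foldl pvCp h.toList
      <+: pvCp h.toList ((h :: t).getLastD "").toList := by
    refine prefix_pvCp _ _ _ h1a ?_
    rcases List.mem_cons.mp hLmem with heq | hm
    · rw [heq]; exact h1a
    · exact h1b _ (List.mem_map_of_mem hm)
  have hdir2 : pvCp h.toList ((h :: t).getLastD "").toList
      <+: (t.map String.toList).foldl pvCp h.toList := by
    refine prefix_foldl_pvCp _ _ _ (pvCp_prefix_left _ _) ?_
    intro x hx
    obtain ⟨m, hm, rfl⟩ := List.mem_map.mp hx
    have h1 : h ≤ m := (List.pairwise_cons.mp hp).1 m hm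
    have h2 : m ≤ (h :: t).getLastD "" :=
      pairwise_le_getLastD _ hp m (List.mem_cons_of_mem _ hm)
    exact pvCp_between h.toList m.toList ((h :: t).getLastD "").toList
      (String.le_iff_toList_le.mp h1) (String.le_iff_toList_le.mp h2)
  exact hdir1.eq_of_length_le hdir2.length_le

-- ===== VERDICT (by name: the statement is the Claim_ definition above) =====
theorem compact_node_names_spec : Claim_equal_compact_node_names := by
  intro names _
  unfold Spec_compact_node_names compact_node_names compact_node_names_alt
  have hsort := PySem.List.sorted_pairwise (PySem.Set.ofList names) (fun x => x)
  set nl := PySem.List.sorted (PySem.Set.ofList names) (fun x => x) false with hnl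
  clear_value nl
  by_cases hlen : nl.length ≤ 1
  · simp only [if_pos hlen]
  · simp only [if_neg hlen]
    rcases nl with _ | ⟨h, t⟩
    · simp at hlen
    rcases t with _ | ⟨b, t'⟩
    · simp at hlen
    have hdrop : PySem.List.slice (h :: b :: t') (some 1) none = b :: t' := by
      rw [PySem.List.slice_from (h :: b :: t') (by norm_num)]
      simp
    have hcong := PySem.List.foldl_congr_mem (l := b :: t') (init := h.toList)
      (f := fun (p : List Char) (n : String) => pvShrink n.toList p)
      (g := fun (p : List Char) (n : String) => pvCp p n.toList)
      (fun acc x _ => pvShrink_eq x.toList acc)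
    have hpfx : (b :: t').foldl (fun p n => pvShrink n.toList p) h.toList
        = pvCp h.toList (((h :: b :: t').getLastD "").toList) := by
      rw [hcong]
      exact fold_eq_cp_last h (b :: t') hsort
    have hlcp : pvLcpLen h.toList (((h :: b :: t').getLastD "").toList)
        = (pvCp h.toList (((h :: b :: t').getLastD "").toList)).length :=
      pvLcpLen_eq h.toList (((h :: b :: t').getLastD "").toList)
    simp only [hdrop, List.headI, hpfx, hlcp]
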